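-- pv_equiv track=rewrite | github.com/fostercole/nd-mines | lab.py | get_all_valid_neighbors
-- ===== SOURCE A (Python) =====
-- def get_all_directions(num_dimensions):
--     """
--     Given a int num_dimensions, returns a list of lists of all possible directions
--
--     Ex: get_all_directions(2) == [[-1,-1], [-1,1], [1,-1], [1,-1],
--                                   [1,0], [0, 1], [-1,0], [0,-1]]
--
--     Parameters:
--        num_dimensions (int): Number of dimensions. 3 dimensions would contain all
--        tuples of size 3 with elements from the set {-1,1,0}, except for (0,0,0).
--     Returns:
--        List of lists
--     """
--
--     def all_directions_including_zero(num_dimensions):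
--         if num_dimensions == 0:
--             return [[]]
--         output = []
--         for direction in all_directions_including_zero(num_dimensions - 1):
--             output.append(direction + [-1])
--             output.append(direction + [1])
--             output.append(direction + [0])
--         return output
--
--     no_zero = all_directions_including_zero(num_dimensions)
--     no_zero.remove([0] * num_dimensions)
--     return no_zero
--
-- def is_valid_index(coordinates, dimensions):
--     """
--     Given coordinates and the dimensions of the board,
--     returns True iff the index is on the board.
--
--     Parameters:
--        coordinates (list): Arbitrary coordinates
--        dimensions (tuple): Board dimensions
--
--     Returns:
--        True if coordinates are on the board, False otherwise
--     """
--     assert len(coordinates) == len(dimensions)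
--
--     for i,_ in enumerate(coordinates):
--         if coordinates[i] < 0 or coordinates[i] >= dimensions[i]:
--             return False
--     return True
--
-- def get_all_valid_neighbors(coordinates, dimensions):
--     """
--     Gets all the neighbors of given coordinate on a board of size dimensions
--
--     Parameters:
--        coordinates (list): Specific coordinate
--        dimensions (tuple): Board dimensions
--
--     Returns:
--        All neighbors of coordinate that are on the board (list of lists)
--     """
--     assert len(coordinates) == len(dimensions)
--
--     all_neighbors = []
--     directions = get_all_directions(len(dimensions))
--     for direction in directions:
--         output = []
--         for idx, value in enumerate(direction):
--             output.append(value + coordinates[idx])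
--         if is_valid_index(output, dimensions):
--             all_neighbors.append(output)
--     return all_neighbors
-- ===== SOURCE B (Python) =====
-- def get_all_valid_neighbors(coordinates, dimensions):
--     """
--     Gets all the neighbors of given coordinate on a board of size dimensions.
--
--     Per-dimension pruning: for each dimension keep only the offsets that stay
--     on the board, take the Cartesian product of those small lists (last
--     dimension fastest, offsets tried in the order -1, 1, 0), and finally drop
--     the coordinate itself (the all-zero offset).
--     """
--     assert len(coordinates) == len(dimensions)
--
--     def go(i):
--         if i == len(coordinates):
--             return [[]]
--         rest = go(i + 1)
--         return [[coordinates[i] + o] + tail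
--                 for o in (-1, 1, 0)
--                 if 0 <= coordinates[i] + o < dimensions[i]
--                 for tail in rest]
--
--     return [nbr for nbr in go(0) if nbr != list(coordinates)]
-- ===== Notes on version B (the rewrite author's own statement) =====
-- stated objective: alternative
-- what changed: B prunes per dimension (keeps only in-bounds offsets for each axis) and builds the Cartesian product of those pruned lists by recursion on the first axis, then drops the coordinate itself, instead of A's generate-all-3^d-directions, remove the zero vector, and bounds-check each candidate.
import Mathlib
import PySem

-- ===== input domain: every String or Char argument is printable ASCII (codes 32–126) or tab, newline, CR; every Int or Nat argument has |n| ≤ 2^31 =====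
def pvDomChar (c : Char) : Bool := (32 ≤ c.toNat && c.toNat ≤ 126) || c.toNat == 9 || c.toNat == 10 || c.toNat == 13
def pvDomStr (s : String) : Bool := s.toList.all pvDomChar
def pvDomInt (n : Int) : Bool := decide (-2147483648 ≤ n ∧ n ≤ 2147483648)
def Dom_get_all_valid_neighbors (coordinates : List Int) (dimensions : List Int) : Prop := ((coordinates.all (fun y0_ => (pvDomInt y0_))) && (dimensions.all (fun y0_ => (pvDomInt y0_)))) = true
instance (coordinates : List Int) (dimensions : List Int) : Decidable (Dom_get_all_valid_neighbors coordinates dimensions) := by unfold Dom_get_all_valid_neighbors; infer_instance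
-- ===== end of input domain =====

-- B replaces A's generate-all-3^d-directions + remove-zero + bounds-check by a per-dimension
-- pruned Cartesian product (recursion on the first axis) followed by dropping the coordinate
-- itself; same return value, no side effects in either.

-- ===== PORT A =====
def all_directions_including_zero : Nat → List (List Int)
  | 0 => [[]]
  | n + 1 =>
      (all_directions_including_zero n).foldl
        (fun output direction =>
          output ++ [direction ++ [-1], direction ++ [1], direction ++ [0]]) []

-- Python's no_zero.remove([0]*n) never raises here (the zero vector is always present),
-- so the `.getD []` default is unreachable.
def get_all_directions (num_dimensions : Nat) : List (List Int) :=
  (PySem.List.remove? (all_directions_including_zero num_dimensions)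
      (List.replicate num_dimensions (0 : Int))).getD []

def is_valid_index : List Int → List Int → Bool
  | [], _ => true
  | c :: cs, d :: ds => if c < 0 || d ≤ c then false else is_valid_index cs ds
  | _ :: _, [] => true  -- unreachable: A asserts equal lengths

def get_all_valid_neighbors (coordinates : List Int) (dimensions : List Int) : List (List Int) :=
  (get_all_directions dimensions.length).foldl
    (fun all_neighbors direction =>
      let output := direction.zipWith (· + ·) coordinates
      if is_valid_index output dimensions then all_neighbors ++ [output] else all_neighbors) []

-- ===== PORT B =====
-- go(i) of Source B, recursing on the coordinate/dimension suffixes instead of the index i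
def neighbor_lists : List Int → List Int → List (List Int)
  | [], _ => [[]]
  | c :: cs, d :: ds =>
      (([-1, 1, 0] : List Int).filter (fun o => decide (0 ≤ c + o) && decide (c + o < d))).flatMap
        (fun o => (neighbor_lists cs ds).map (fun tail => (c + o) :: tail))
  | _ :: _, [] => [[]]  -- unreachable: B asserts equal lengths

def get_all_valid_neighbors_alt (coordinates : List Int) (dimensions : List Int) : List (List Int) :=
  (neighbor_lists coordinates dimensions).filter (fun nbr => nbr != coordinates)

-- ===== PRECONDITION & SPEC =====
-- Pre_ excludes exactly the inputs of unequal length, on which both A and B raise AssertionError.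
def Pre_get_all_valid_neighbors (coordinates : List Int) (dimensions : List Int) : Prop :=
  coordinates.length = dimensions.length
instance (coordinates : List Int) (dimensions : List Int) : Decidable (Pre_get_all_valid_neighbors coordinates dimensions) := by unfold Pre_get_all_valid_neighbors; infer_instance
def pvWitness_get_all_valid_neighbors : List Int × List Int := ([1, 1], [3, 3])

def Spec_get_all_valid_neighbors (coordinates : List Int) (dimensions : List Int) (out : List (List Int)) : Prop := out = get_all_valid_neighbors_alt coordinates dimensions
instance (coordinates : List Int) (dimensions : List Int) (out : List (List Int)) : Decidable (Spec_get_all_valid_neighbors coordinates dimensions out) := by unfold Spec_get_all_valid_neighbors; infer_instance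

-- ===== CLAIM (what is proved, stated in full; the proofs are below) =====
def Claim_equal_get_all_valid_neighbors : Prop := ∀ (coordinates : List Int) (dimensions : List Int), Dom_get_all_valid_neighbors coordinates dimensions → Pre_get_all_valid_neighbors coordinates dimensions → Spec_get_all_valid_neighbors coordinates dimensions (get_all_valid_neighbors coordinates dimensions)

-- ===== LEMMAS AND PROOFS =====

-- cons-form of all_directions_including_zero (A builds it by appending the LAST axis)
def adzC : Nat → List (List Int)
  | 0 => [[]]
  | n + 1 => ([-1, 1, 0] : List Int).flatMap (fun o => (adzC n).map (o :: ·))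

theorem adz_succ (n : Nat) :
    all_directions_including_zero (n + 1)
      = (all_directions_including_zero n).flatMap
          (fun d => [d ++ [-1], d ++ [1], d ++ [0]]) := by
  simp [all_directions_including_zero, List.flatMap]

theorem adzC_snoc (n : Nat) :
    adzC (n + 1) = (adzC n).flatMap (fun d => [d ++ [-1], d ++ [1], d ++ [0]]) := by
  induction n with
  | zero => decide
  | succ n ih =>
      conv_lhs => rw [adzC, ih]
      rw [adzC]
      simp [List.flatMap_map, List.map_flatMap]

theorem adz_eq_adzC (n : Nat) : all_directions_including_zero n = adzC n := by
  induction n with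
  | zero => rfl
  | succ n ih => rw [adz_succ, ih, adzC_snoc]

theorem length_mem_adzC (n : Nat) : ∀ d ∈ adzC n, d.length = n := by
  induction n with
  | zero => simp [adzC]
  | succ n ih =>
      intro d hd
      simp only [adzC, List.mem_flatMap, List.mem_map] at hd
      obtain ⟨o, _, t, ht, rfl⟩ := hd
      simp [ih t ht]

theorem count_zero_adzC (n : Nat) :
    (adzC n).count (List.replicate n (0 : Int)) = 1 := by
  induction n with
  | zero => decide
  | succ n ih =>
      simp only [adzC, List.flatMap_cons, List.flatMap_nil, List.append_nil,
        List.count_append, List.replicate_succ]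
      have key : ∀ (o : Int), o ≠ 0 →
          ((adzC n).map (o :: ·)).count ((0 : Int) :: List.replicate n 0) = 0 := by
        intro o ho
        rw [List.count_eq_zero]
        intro h
        simp only [List.mem_map] at h
        obtain ⟨t, _, ht⟩ := h
        exact ho (List.cons.injEq .. ▸ ht).1
      have k0 : ((adzC n).map ((0 : Int) :: ·)).count ((0 : Int) :: List.replicate n 0) = 1 := by
        rw [show ((0 : Int) :: List.replicate n 0) = (fun t => (0 : Int) :: t) (List.replicate n 0) from rfl,
          List.count_map_of_injective _ _ (fun a b h => (List.cons.injEq .. ▸ h).2), ih]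
      rw [key (-1) (by decide), key 1 (by decide), k0]

theorem zero_mem_adzC (n : Nat) : List.replicate n (0 : Int) ∈ adzC n := by
  rw [← List.count_pos_iff, count_zero_adzC]; decide

-- g dir = coordinates ↔ dir is the zero vector (for equal lengths)
theorem zip_add_eq_self_iff : ∀ (dir cs : List Int), dir.length = cs.length →
    (dir.zipWith (· + ·) cs = cs ↔ dir = List.replicate cs.length (0 : Int)) := by
  intro dir
  induction dir with
  | nil => intro cs h; simp_all [(List.length_eq_zero_iff).mp h.symm]
  | cons v vs ih =>
      intro cs h
      cases cs with
      | nil => simp at h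
      | cons c cs' =>
          simp only [List.zipWith_cons_cons, List.length_cons, List.replicate_succ,
            List.cons.injEq]
          constructor
          · rintro ⟨h1, h2⟩
            exact ⟨by omega, (ih cs' (by simpa using h)).mp h2⟩
          · rintro ⟨h1, h2⟩
            exact ⟨by omega, (ih cs' (by simpa using h)).mpr h2⟩

-- one product block of B: prefixing one offset then filtering collapses to an if
theorem step_block (c d o : Int) (cs' ds' : List Int) (L : List (List Int)) :
    ((L.map (o :: ·)).map (fun dir => dir.zipWith (· + ·) (c :: cs'))).filter
        (fun out => is_valid_index out (d :: ds'))
      = if decide (0 ≤ c + o) && decide (c + o < d) then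
          (((L.map (fun dir => dir.zipWith (· + ·) cs')).filter
              (fun out => is_valid_index out ds')).map (fun tail => (c + o) :: tail))
        else [] := by
  by_cases hin : (0 ≤ c + o) ∧ (c + o < d)
  · rw [if_pos (by simp [hin.1, hin.2])]
    induction L with
    | nil => simp
    | cons a L ihL =>
        simp only [List.map_cons, List.zipWith_cons_cons, List.filter_cons]
        have hval : is_valid_index ((o + c) :: List.zipWith (· + ·) a cs') (d :: ds')
            = is_valid_index (List.zipWith (· + ·) a cs') ds' := by
          simp only [is_valid_index]
          rw [if_neg (by simp; omega)]
        rw [hval]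
        by_cases hv : is_valid_index (List.zipWith (· + ·) a cs') ds'
        · simp [hv, Int.add_comm o c, -List.map_map, ihL]
        · simp [hv, -List.map_map, ihL]
  · rw [if_neg (by simpa using fun h1 h2 => hin ⟨h1, h2⟩)]
    rw [List.filter_eq_nil_iff]
    intro x hx
    simp only [List.map_map, List.mem_map, Function.comp] at hx
    obtain ⟨dir, -, rfl⟩ := hx
    simp only [List.zipWith_cons_cons, is_valid_index]
    rw [if_pos (by simp; omega)]
    simp

-- B's filtered 3-element flatMap written as three (possibly empty) blocks
theorem fm3 (P : Int → Bool) (F : Int → List (List Int)) :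
    ((([-1, 1, 0] : List Int).filter P).flatMap F)
      = (if P (-1) then F (-1) else []) ++ ((if P 1 then F 1 else []) ++ (if P 0 then F 0 else [])) := by
  cases h1 : P (-1) <;> cases h2 : P 1 <;> cases h3 : P 0 <;>
    simp [List.filter, h1, h2, h3]

-- B's recursion computes exactly the valid candidates of adzC, in order
theorem neighbor_lists_eq : ∀ (cs ds : List Int), cs.length = ds.length →
    neighbor_lists cs ds
      = ((adzC ds.length).map (fun dir => dir.zipWith (· + ·) cs)).filter
          (fun out => is_valid_index out ds) := by
  intro cs
  induction cs with
  | nil =>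
      intro ds h
      rw [(List.length_eq_zero_iff).mp h.symm]
      decide
  | cons c cs' ih =>
      intro ds h
      cases ds with
      | nil => simp at h
      | cons d ds' =>
          have ih' := ih ds' (by simpa using h)
          have hsplit : adzC ((d :: ds').length)
              = (adzC ds'.length).map ((-1 : Int) :: ·)
                ++ ((adzC ds'.length).map ((1 : Int) :: ·)
                  ++ (adzC ds'.length).map ((0 : Int) :: ·)) := by
            simp [adzC]
          rw [hsplit]
          simp only [List.map_append, List.filter_append]
          rw [show neighbor_lists (c :: cs') (d :: ds')
              = (([-1, 1, 0] : List Int).filter (fun o => decide (0 ≤ c + o) && decide (c + o < d))).flatMap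
                  (fun o => (neighbor_lists cs' ds').map (fun tail => (c + o) :: tail)) from rfl]
          rw [fm3, ih', step_block, step_block, step_block]

-- removing the first zero vector before mapping = filtering out `coordinates` after
theorem erase_filter_lemma (cs ds : List Int) :
    ∀ (l : List (List Int)), (∀ d ∈ l, d.length = cs.length) →
      l.count (List.replicate cs.length (0 : Int)) = 1 →
      ((l.erase (List.replicate cs.length (0 : Int))).map
            (fun dir => dir.zipWith (· + ·) cs)).filter (fun out => is_valid_index out ds)
        = ((l.map (fun dir => dir.zipWith (· + ·) cs)).filter
            (fun out => is_valid_index out ds)).filter (fun nbr => nbr != cs) := by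
  intro l
  induction l with
  | nil => simp
  | cons a l' ih =>
      intro hlen hcnt
      by_cases ha : a = List.replicate cs.length (0 : Int)
      · subst ha
        rw [List.erase_cons_head]
        have hz : l'.count (List.replicate cs.length (0 : Int)) = 0 := by
          simpa [List.count_cons] using hcnt
        have hnz : ∀ dir ∈ l', dir.zipWith (· + ·) cs ≠ cs := by
          intro dir hdir hEq
          have := (zip_add_eq_self_iff dir cs (hlen dir (by simp [hdir]))).mp hEq
          rw [List.count_eq_zero] at hz
          exact hz (this ▸ hdir)
        have hid : ((l'.map (fun dir => dir.zipWith (· + ·) cs)).filter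
              (fun out => is_valid_index out ds)).filter (fun nbr => nbr != cs)
            = (l'.map (fun dir => dir.zipWith (· + ·) cs)).filter
              (fun out => is_valid_index out ds) := by
          rw [List.filter_eq_self]
          intro x hx
          have hx' := List.mem_of_mem_filter hx
          simp only [List.mem_map] at hx'
          obtain ⟨dir, hdir, rfl⟩ := hx'
          simpa using hnz dir hdir
        have hself : (List.replicate cs.length (0 : Int)).zipWith (· + ·) cs = cs := by
          exact (zip_add_eq_self_iff _ cs (by simp)).mpr rfl
        simp only [List.map_cons, List.filter_cons, hself]
        by_cases hv : is_valid_index cs ds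
        · simp [hv, hid]
        · simp [hv, hid]
      · rw [List.erase_cons_tail (by simpa using ha)]
        have hcnt' : l'.count (List.replicate cs.length (0 : Int)) = 1 := by
          simpa [List.count_cons, ha] using hcnt
        have ihl := ih (fun d hd => hlen d (by simp [hd])) hcnt'
        have hne : a.zipWith (· + ·) cs ≠ cs := by
          intro hEq
          exact ha ((zip_add_eq_self_iff a cs (hlen a (by simp))).mp hEq)
        simp only [List.map_cons, List.filter_cons]
        by_cases hv : is_valid_index (a.zipWith (· + ·) cs) ds
        · simp [hv, ihl, hne]
        · simp [hv, ihl]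

-- ===== VERDICT (by name: the statement is the Claim_ definition above) =====
theorem get_all_valid_neighbors_spec : Claim_equal_get_all_valid_neighbors := by
  intro cs ds _ hpre
  unfold Spec_get_all_valid_neighbors
  unfold get_all_valid_neighbors get_all_valid_neighbors_alt get_all_directions
  have hlen : cs.length = ds.length := hpre
  have hmem : List.replicate ds.length (0 : Int) ∈ all_directions_including_zero ds.length := by
    rw [adz_eq_adzC]; exact zero_mem_adzC ds.length
  rw [PySem.List.remove?_eq_some_erase _ _ hmem, Option.getD_some]
  rw [show (fun (all_neighbors : List (List Int)) (direction : List Int) =>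
        let output := direction.zipWith (· + ·) cs
        if is_valid_index output ds then all_neighbors ++ [output] else all_neighbors)
      = (fun acc direction => if is_valid_index (direction.zipWith (· + ·) cs) ds
          then acc ++ [direction.zipWith (· + ·) cs] else acc) from rfl]
  have hfold := PySem.List.foldl_append_if
    (fun direction : List Int => is_valid_index (direction.zipWith (· + ·) cs) ds)
    (fun direction : List Int => direction.zipWith (· + ·) cs)
    ((all_directions_including_zero ds.length).erase (List.replicate ds.length 0)) []
  simp only [] at hfold
  have bridge : ∀ (l : List (List Int)),
      (l.filter (fun dir => is_valid_index (dir.zipWith (· + ·) cs) ds)).map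
          (fun dir => dir.zipWith (· + ·) cs)
        = (l.map (fun dir => dir.zipWith (· + ·) cs)).filter
            (fun out => is_valid_index out ds) := by
    intro l
    exact (List.filter_map (f := fun dir => dir.zipWith (· + ·) cs)
      (p := fun out => is_valid_index out ds) (l := l)).symm
  rw [hfold, List.nil_append, bridge]
  rw [adz_eq_adzC, neighbor_lists_eq cs ds hlen]
  rw [← hlen]
  exact erase_filter_lemma cs ds (adzC cs.length)
    (fun d hd => length_mem_adzC cs.length d hd)
    (count_zero_adzC cs.length)
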